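-- pv_equiv track=rewrite | github.com/ellepannitto/patchwork | Pezzo.py | count_ver
-- ===== SOURCE A (Python) =====
-- def count_ver(mat):
--
-- 	r =  []
--
-- 	for i in range(len(mat[0])):
-- 		maxlen = 0
-- 		l = 0
--
-- 		line = [el[i] for el in mat]
--
-- 		for x in line:
-- 			if x == 'x':
-- 				l +=1
-- 			else:
-- 				l=0
--
-- 			if l > maxlen:
-- 				maxlen=l
--
-- 		r.append(maxlen)
--
-- 	return r
-- ===== SOURCE B (Python) =====
-- def count_ver(mat):
-- 	n = len(mat[0])
-- 	cur = [0] * n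
-- 	best = [0] * n
-- 	for row in mat:
-- 		cur = [c + 1 if ch == 'x' else 0 for c, ch in zip(cur, row)]
-- 		best = [max(b, c) for b, c in zip(best, cur)]
-- 	return best
-- ===== Notes on version B (the rewrite author's own statement) =====
-- stated objective: alternative
-- what changed: Replaces A's column-major nested scan (which re-extracts each column from the matrix and folds a (maxlen,l) pair over it) by a single row-major pass maintaining per-column current-run and best-run vectors updated with zip; Pre_ excludes inputs where A raises IndexError (empty matrix or a row shorter than the first row).
-- outside the precondition, e.g. on count_ver([['x', 'x'], ['x']]): A raises IndexError, B returns [2]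
import Mathlib
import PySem

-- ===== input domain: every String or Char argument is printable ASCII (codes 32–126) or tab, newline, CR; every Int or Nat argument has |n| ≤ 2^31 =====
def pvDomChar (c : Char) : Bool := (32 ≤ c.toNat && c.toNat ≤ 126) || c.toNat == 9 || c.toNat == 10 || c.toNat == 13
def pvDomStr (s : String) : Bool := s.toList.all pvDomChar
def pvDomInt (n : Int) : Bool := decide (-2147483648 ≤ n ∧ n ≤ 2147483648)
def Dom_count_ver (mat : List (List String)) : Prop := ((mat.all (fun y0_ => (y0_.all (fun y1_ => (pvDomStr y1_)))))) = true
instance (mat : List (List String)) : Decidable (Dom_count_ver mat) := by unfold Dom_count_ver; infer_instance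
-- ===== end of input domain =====

-- B replaces A's column-major nested scan by a single row-major pass maintaining
-- per-column current-run and best-run vectors (alternative decomposition, same cost).

-- ===== PORT A =====
def count_ver (mat : List (List String)) : List Int :=
  (PySem.List.pyRange 0 ((mat.headD []).length : Int) 1).foldl
    (fun r i =>
      let line := mat.map (fun el => (PySem.List.pyGet? el i).getD "")
      let p := line.foldl
        (fun (s : Int × Int) x =>
          let l := if x == "x" then s.2 + 1 else 0
          (if l > s.1 then l else s.1, l)) (0, 0)
      r ++ [p.1]) []

-- ===== PORT B =====
def count_ver_alt (mat : List (List String)) : List Int :=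
  let n := (mat.headD []).length
  (mat.foldl
    (fun (p : List Int × List Int) row =>
      let cur := (p.1.zip row).map (fun cc => if cc.2 == "x" then cc.1 + 1 else 0)
      (cur, (p.2.zip cur).map (fun bc => max bc.1 bc.2)))
    (List.replicate n 0, List.replicate n 0)).2

-- ===== PRECONDITION & SPEC =====
-- Pre_ excludes exactly the inputs where A raises IndexError: the empty matrix
-- (mat[0]) and matrices with a row shorter than the first row (el[i]).
def Pre_count_ver (mat : List (List String)) : Prop :=
  mat ≠ [] ∧ ∀ row ∈ mat, (mat.headD []).length ≤ row.length
instance (mat : List (List String)) : Decidable (Pre_count_ver mat) := by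
  unfold Pre_count_ver; infer_instance
def pvWitness_count_ver : List (List String) := [["x", "o"], ["x", "x"], ["x", "x"]]
def Spec_count_ver (mat : List (List String)) (out : List Int) : Prop := out = count_ver_alt mat
instance (mat : List (List String)) (out : List Int) : Decidable (Spec_count_ver mat out) := by unfold Spec_count_ver; infer_instance

-- ===== CLAIM (what is proved, stated in full; the proofs are below) =====
def Claim_equal_count_ver : Prop := ∀ (mat : List (List String)), Dom_count_ver mat → Pre_count_ver mat → Spec_count_ver mat (count_ver mat)

-- ===== LEMMAS AND PROOFS =====

-- A's inner-loop step on the (maxlen, l) pair, named for the proofs.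
def cvStep (s : Int × Int) (x : String) : Int × Int :=
  let l := if x == "x" then s.2 + 1 else 0
  (if l > s.1 then l else s.1, l)

-- the pair-list evolution that underlies B's (cur, best) state
def cvFold (rows : List (List String)) (ps : List (Int × Int)) : List (Int × Int) :=
  rows.foldl (fun q r => (q.zip r).map (fun pr => cvStep pr.1 pr.2)) ps

lemma cvFold_cons (r : List String) (rows : List (List String)) (ps : List (Int × Int)) :
    cvFold (r :: rows) ps = cvFold rows ((ps.zip r).map (fun pr => cvStep pr.1 pr.2)) := rfl

lemma cvFold_length (rows : List (List String)) (ps : List (Int × Int))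
    (h : ∀ r ∈ rows, ps.length ≤ r.length) : (cvFold rows ps).length = ps.length := by
  induction rows generalizing ps with
  | nil => rfl
  | cons r rows ih =>
    rw [cvFold_cons, ih]
    · simp [Nat.min_eq_left (h r (by simp))]
    · intro r' hr'
      simpa [Nat.min_eq_left (h r (by simp))] using h r' (by simp [hr'])

-- B's one-row update as a named function (syntactically A-free; used only by proofs)
def cvStepB (p : List Int × List Int) (row : List String) : List Int × List Int :=
  let cur := (p.1.zip row).map (fun cc => if cc.2 == "x" then cc.1 + 1 else 0)
  (cur, (p.2.zip cur).map (fun bc => max bc.1 bc.2))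

lemma stepB_snd (ps : List (Int × Int)) (row : List String) :
    ((ps.map Prod.snd).zip row).map (fun cc => if cc.2 == "x" then cc.1 + 1 else 0)
      = ((ps.zip row).map (fun pr => cvStep pr.1 pr.2)).map Prod.snd := by
  induction ps generalizing row with
  | nil => simp
  | cons p ps ih =>
    cases row with
    | nil => simp
    | cons x row => simpa [cvStep] using ih row

lemma stepB_fst (ps : List (Int × Int)) (row : List String) :
    ((ps.map Prod.fst).zip (((ps.zip row).map (fun pr => cvStep pr.1 pr.2)).map Prod.snd)).map
        (fun bc => max bc.1 bc.2)
      = ((ps.zip row).map (fun pr => cvStep pr.1 pr.2)).map Prod.fst := by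
  induction ps generalizing row with
  | nil => simp
  | cons p ps ih =>
    cases row with
    | nil => simp
    | cons x row =>
      simp only [List.map_cons, List.zip_cons_cons, ih, List.cons.injEq, and_true]
      show max p.1 (cvStep p x).2 = (cvStep p x).1
      by_cases hx : x == "x" <;> simp [cvStep, hx, max_def] <;> omega

lemma stepB_pair (ps : List (Int × Int)) (row : List String) :
    cvStepB (ps.map Prod.snd, ps.map Prod.fst) row
      = (((ps.zip row).map (fun pr => cvStep pr.1 pr.2)).map Prod.snd,
         ((ps.zip row).map (fun pr => cvStep pr.1 pr.2)).map Prod.fst) := by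
  show (_, _) = (_, _)
  rw [Prod.mk.injEq]
  refine ⟨stepB_snd ps row, ?_⟩
  show ((ps.map Prod.fst).zip (((ps.map Prod.snd).zip row).map _)).map _ = _
  rw [stepB_snd ps row]
  exact stepB_fst ps row

-- B's fold equals the pair-list evolution, projected
lemma foldB_eq (rows : List (List String)) (ps : List (Int × Int))
    (h : ∀ r ∈ rows, ps.length ≤ r.length) :
    rows.foldl cvStepB (ps.map Prod.snd, ps.map Prod.fst)
      = ((cvFold rows ps).map Prod.snd, (cvFold rows ps).map Prod.fst) := by
  induction rows generalizing ps with
  | nil => rfl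
  | cons r rows ih =>
    have hr : ps.length ≤ r.length := h r (by simp)
    have hlen : ((ps.zip r).map (fun pr => cvStep pr.1 pr.2)).length = ps.length := by
      simp [Nat.min_eq_left hr]
    rw [List.foldl_cons, stepB_pair ps r]
    exact ih ((ps.zip r).map (fun pr => cvStep pr.1 pr.2))
      (by intro r' hr'; rw [hlen]; exact h r' (by simp [hr']))

-- each entry of the pair-list evolution is the per-column fold
lemma cvFold_getD (rows : List (List String)) (ps : List (Int × Int))
    (h : ∀ r ∈ rows, ps.length ≤ r.length) (k : Nat) (hk : k < ps.length) :
    (cvFold rows ps).getD k (0, 0)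
      = (rows.map (fun r => r.getD k "")).foldl cvStep (ps.getD k (0, 0)) := by
  induction rows generalizing ps with
  | nil => rfl
  | cons r rows ih =>
    have hr : ps.length ≤ r.length := h r (by simp)
    have hlen : ((ps.zip r).map (fun pr => cvStep pr.1 pr.2)).length = ps.length := by
      simp [Nat.min_eq_left hr]
    rw [cvFold_cons, ih _ (by intro r' hr'; rw [hlen]; exact h r' (by simp [hr'])) (by omega)]
    have hkr : k < r.length := lt_of_lt_of_le hk hr
    rw [List.map_cons, List.foldl_cons]
    congr 1
    rw [List.getD_eq_getElem _ _ (by omega), List.getD_eq_getElem _ _ hk,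
      List.getD_eq_getElem _ _ hkr]
    simp

theorem count_ver_spec : Claim_equal_count_ver := by
  intro mat _ hpre
  obtain ⟨hne, hrows⟩ := hpre
  unfold Spec_count_ver count_ver count_ver_alt
  set n := (mat.headD []).length with hn
  rw [PySem.List.foldl_append_singleton_eq_map, PySem.List.pyRange_zero_nat, List.map_map]
  have hps : ∀ r ∈ mat, (List.replicate n ((0 : Int), (0 : Int))).length ≤ r.length := by
    intro r hr; simpa using hrows r hr
  have hB : (mat.foldl cvStepB (List.replicate n (0 : Int), List.replicate n (0 : Int))).2
      = (cvFold mat (List.replicate n ((0, 0) : Int × Int))).map Prod.fst := by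
    have := foldB_eq mat (List.replicate n ((0, 0) : Int × Int)) hps
    simp only [List.map_replicate] at this
    rw [this]
  show _ = (mat.foldl cvStepB (List.replicate n (0 : Int), List.replicate n (0 : Int))).2
  rw [hB]
  have hlen : (cvFold mat (List.replicate n ((0, 0) : Int × Int))).length = n := by
    simpa using cvFold_length mat _ hps
  apply List.ext_getElem
  · simp [hlen]
  · intro k h1 h2
    have hk : k < n := by simpa using h1
    have hcol := cvFold_getD mat (List.replicate n ((0, 0) : Int × Int)) hps k (by simpa using hk)
    have h0 : (List.replicate n ((0, 0) : Int × Int)).getD k (0, 0) = (0, 0) := by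
      rw [List.getD_eq_getElem _ _ (by simpa using hk)]; exact List.getElem_replicate ..
    rw [h0] at hcol
    have hkcv : k < (cvFold mat (List.replicate n ((0, 0) : Int × Int))).length := by omega
    have hgd : (cvFold mat (List.replicate n ((0, 0) : Int × Int))).getD k (0, 0)
        = (cvFold mat (List.replicate n ((0, 0) : Int × Int)))[k] :=
      List.getD_eq_getElem _ _ hkcv
    simp only [List.nil_append, List.getElem_map, List.getElem_range, Function.comp_apply]
    rw [← hgd, hcol]
    show ((mat.map (fun el => (PySem.List.pyGet? el (k : Int)).getD "")).foldl cvStep (0, 0)).1 = _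
    congr 2
    apply List.map_congr_left
    intro el hel
    have : k < el.length := lt_of_lt_of_le hk (hrows el hel)
    simp [PySem.List.pyGet?_natCast, List.getD_eq_getElem?_getD]
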